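-- pv_equiv track=rewrite | github.com/satyaaditya/Python_BTech | week4.py | orangecap
-- ===== SOURCE A (Python) =====
-- from collections import defaultdict
--
-- def orangecap(a):
--
--     b=[]
--     c=defaultdict(list)
--     b=[a[k] for k in a]
--     for i in b:
--         for j in i:
--             c[j].append(i[j])
--     a=[(sum(c[i]),i) for i in c]
--     a.sort(reverse=True)
--     return (a[0][1],a[0][0])
-- ===== SOURCE B (Python) =====
-- def orangecap(a):
--     totals = {}
--     for m in a.values():
--         for n, s in m.items():
--             totals[n] = totals.get(n, 0) + s
--     best = max((t, n) for n, t in totals.items())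
--     return (best[1], best[0])
-- ===== Notes on version B (the rewrite author's own statement) =====
-- stated objective: alternative
-- what changed: Drops A's per-player score-list dict and the full descending sort: B accumulates integer running totals in one pass over the items and picks the winner with a single max scan over (total, name) tuples.
-- outside the precondition, e.g. on orangecap({}): A raises IndexError, B raises ValueError
import Mathlib
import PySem

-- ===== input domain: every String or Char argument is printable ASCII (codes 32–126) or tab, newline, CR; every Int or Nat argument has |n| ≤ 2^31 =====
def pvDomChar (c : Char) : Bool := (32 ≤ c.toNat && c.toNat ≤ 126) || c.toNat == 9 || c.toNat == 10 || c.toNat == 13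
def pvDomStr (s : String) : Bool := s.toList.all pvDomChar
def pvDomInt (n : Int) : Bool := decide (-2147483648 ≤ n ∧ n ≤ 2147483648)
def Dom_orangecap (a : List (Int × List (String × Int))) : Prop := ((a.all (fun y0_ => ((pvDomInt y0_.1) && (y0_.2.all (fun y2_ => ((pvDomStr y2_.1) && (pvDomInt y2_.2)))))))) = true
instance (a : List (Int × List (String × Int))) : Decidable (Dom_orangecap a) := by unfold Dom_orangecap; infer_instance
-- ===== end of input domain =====

-- B replaces A's per-player score-list dict plus full descending sort by integer running
-- totals and a single max scan; same return value everywhere A returns.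

-- ===== PORT A =====
def orangecap (a : List (Int × List (String × Int))) : String × Int :=
  let d := PySem.Dict.ofList a
  let b := d.keys.map (fun k => PySem.Dict.ofList (d.getD k []))
  let c := b.foldl (fun c i =>
    i.keys.foldl (fun c j => c.modify j [] (fun v => v ++ [i.getD j 0])) c) PySem.Dict.empty
  let pairs := c.keys.map (fun n => ((c.getD n []).sum, n))
  let s := PySem.List.sorted2 pairs (fun p => p.1) (fun p => p.2) true
  match PySem.List.pyGet? s 0 with
  | some p => (p.2, p.1)
  | none => ("", 0)   -- unreachable under Pre_ (Python raises IndexError there)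

-- ===== PORT B =====
def orangecap_alt (a : List (Int × List (String × Int))) : String × Int :=
  let d := PySem.Dict.ofList a
  let ms := d.values.map PySem.Dict.ofList
  let totals := ms.foldl (fun t m =>
    m.items.foldl (fun t p => t.modify p.1 0 (fun v => v + p.2)) t) PySem.Dict.empty
  match PySem.List.max2? (totals.items.map (fun p => (p.2, p.1)))
      (fun p => p.1) (fun p => p.2) with
  | some p => (p.2, p.1)
  | none => ("", 0)   -- unreachable under Pre_ (Python raises ValueError there)

-- ===== PRECONDITION & SPEC =====
-- Pre_ excludes exactly the inputs whose dict holds no player at all: there A raises IndexError and B raises ValueError.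
def Pre_orangecap (a : List (Int × List (String × Int))) : Prop :=
  ∃ m ∈ (PySem.Dict.ofList a).values, m ≠ ([] : List (String × Int))
instance (a : List (Int × List (String × Int))) : Decidable (Pre_orangecap a) := by
  unfold Pre_orangecap; infer_instance

def pvWitness_orangecap : (List (Int × List (String × Int))) := [(1, [("a", 2)])]

def Spec_orangecap (a : List (Int × List (String × Int))) (out : String × Int) : Prop := out = orangecap_alt a
instance (a : List (Int × List (String × Int))) (out : String × Int) : Decidable (Spec_orangecap a out) := by unfold Spec_orangecap; infer_instance

-- ===== CLAIM (what is proved, stated in full; the proofs are below) =====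
def Claim_equal_orangecap : Prop := ∀ (a : List (Int × List (String × Int))), Dom_orangecap a → Pre_orangecap a → Spec_orangecap a (orangecap a)

-- ===== LEMMAS AND PROOFS =====

-- A's grouping loop and B's totals loop insert the same keys in the same order.
theorem keysFold {ν : Type} (step : PySem.Dict String Int → String → ν → ν) (d0 : ν)
    (ms : List (PySem.Dict String Int)) (c0 : PySem.Dict String ν) :
    (ms.foldl (fun c i =>
      i.keys.foldl (fun c j => c.modify j d0 (step i j)) c) c0).keys
    = ms.foldl (fun ns m => PySem.Set.update ns m.keys) c0.keys := by
  induction ms generalizing c0 with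
  | nil => rfl
  | cons i ms ih =>
      simp only [List.foldl_cons, ih,
        PySem.Dict.keys_foldl_modify i.keys d0 (fun _ j => step i j) c0]

-- One inner pass of A over a match with Nodup keys appends the match's score for n iff n is present.
theorem innerGetD (i : PySem.Dict String Int) (hi : i.keys.Nodup)
    (c0 : PySem.Dict String (List Int)) (n : String) :
    (i.keys.foldl (fun c j => c.modify j [] (fun v => v ++ [i.getD j 0])) c0).getD n []
    = c0.getD n [] ++ (if i.contains n then [i.getD n 0] else []) := by
  have h1 : i.keys.foldl (fun c j => c.modify j [] (fun v => v ++ [i.getD j 0])) c0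
      = (i.keys.map (fun j => (j, i.getD j 0))).foldl
          (fun c p => c.modify p.1 [] (fun v => v ++ [p.2])) c0 := by
    rw [List.foldl_map]
  rw [h1, PySem.Dict.getD_foldl_modify_append]
  congr 1
  rw [List.filter_map]
  simp only [Function.comp_def]
  rw [List.filter_beq (l := i.keys) (a := n)]
  by_cases hc : i.contains n = true
  · have hm : n ∈ i.keys := (PySem.Dict.contains_iff_mem_keys i n).mp hc
    rw [List.count_eq_one_of_mem hi hm]
    simp [hc]
  · have hm : n ∉ i.keys := fun h => hc ((PySem.Dict.contains_iff_mem_keys i n).mpr h)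
    rw [List.count_eq_zero.mpr hm]
    simp [hc]

-- A's accumulated score list for n is the scores of the matches containing n, in match order.
theorem getDC (ms : List (PySem.Dict String Int)) (hms : ∀ i ∈ ms, i.keys.Nodup)
    (c0 : PySem.Dict String (List Int)) (n : String) :
    (ms.foldl (fun c i =>
      i.keys.foldl (fun c j => c.modify j [] (fun v => v ++ [i.getD j 0])) c) c0).getD n []
    = c0.getD n [] ++ (ms.filter (fun m => m.contains n)).map (fun m => m.getD n 0) := by
  induction ms generalizing c0 with
  | nil => simp
  | cons i ms ih =>
      simp only [List.foldl_cons]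
      rw [ih (fun j hj => hms j (List.mem_cons_of_mem i hj)),
        innerGetD i (hms i (List.mem_cons_self ..)) c0 n]
      by_cases hc : i.contains n = true <;> simp [hc]

-- One inner pass of B over a key list adds f j where j = n.
theorem innerSum (f : String → Int) (l : List String)
    (t0 : PySem.Dict String Int) (n : String) :
    (l.foldl (fun t j => t.modify j 0 (fun v => v + f j)) t0).getD n 0
    = t0.getD n 0 + ((l.filter (fun j => j == n)).map f).sum := by
  induction l generalizing t0 with
  | nil => simp
  | cons j l ih =>
      simp only [List.foldl_cons, List.filter_cons]
      rw [ih]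
      by_cases hj : j = n
      · subst hj
        rw [PySem.Dict.getD_modify, if_pos rfl]
        simp [add_assoc]
      · rw [PySem.Dict.getD_modify, if_neg (Ne.symm hj)]
        simp [beq_false_of_ne hj]

-- B's running total for n is the sum of n's scores over the matches containing n.
theorem getDT (ms : List (PySem.Dict String Int)) (hms : ∀ i ∈ ms, i.keys.Nodup)
    (t0 : PySem.Dict String Int) (n : String) :
    (ms.foldl (fun t m =>
      m.keys.foldl (fun t j => t.modify j 0 (fun v => v + m.getD j 0)) t) t0).getD n 0
    = t0.getD n 0 + ((ms.filter (fun m => m.contains n)).map (fun m => m.getD n 0)).sum := by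
  induction ms generalizing t0 with
  | nil => simp
  | cons i ms ih =>
      simp only [List.foldl_cons]
      rw [ih (fun j hj => hms j (List.mem_cons_of_mem i hj)),
        innerSum (fun j => i.getD j 0) i.keys t0 n,
        List.filter_beq (l := i.keys) (a := n)]
      by_cases hc : i.contains n = true
      · have hm : n ∈ i.keys := (PySem.Dict.contains_iff_mem_keys i n).mp hc
        rw [List.count_eq_one_of_mem (hms i (List.mem_cons_self ..)) hm]
        simp [hc, add_assoc]
      · have hm : n ∉ i.keys := fun h => hc ((PySem.Dict.contains_iff_mem_keys i n).mpr h)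
        rw [List.count_eq_zero.mpr hm]
        simp [hc]

-- The head of an insertBy fold is the running extremal element under the same test.
theorem foldl_insertBy_head {α : Type} (before : α → α → Bool) (xs : List α) (acc : List α) :
    (xs.foldl (fun acc x => PySem.List.insertBy before x acc) acc).head?
    = xs.foldl (fun o x => match o with
        | none => some x
        | some m => if before x m then some x else some m) acc.head? := by
  induction xs generalizing acc with
  | nil => rfl
  | cons x xs ih =>
      simp only [List.foldl_cons]
      rw [ih]
      congr 1
      cases acc with
      | nil => rfl
      | cons y ys =>
          simp only [PySem.List.insertBy, List.head?_cons]
          by_cases h : before x y = true <;> simp [h]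

-- sorted(xs, reverse=True)[0] is max(xs) (first maximal element), tuple keys included.
theorem sorted2_head_eq_max2? {α κ₁ κ₂ : Type} [LT κ₁] [DecidableLT κ₁] [LT κ₂] [DecidableLT κ₂]
    (xs : List α) (k1 : α → κ₁) (k2 : α → κ₂) :
    (PySem.List.sorted2 xs k1 k2 true).head? = PySem.List.max2? xs k1 k2 := by
  simp only [PySem.List.sorted2, PySem.List.max2?]
  exact foldl_insertBy_head _ xs []

-- xs[0] is the head (nonnegative index, in range iff nonempty).
theorem pyGet?_zero {α : Type} (xs : List α) : PySem.List.pyGet? xs 0 = xs.head? := by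
  cases xs <;> simp [PySem.List.pyGet?, PySem.List.pyIdx?]

-- B's totals dict keeps its keys distinct through the whole loop.
theorem nodupT (ms : List (PySem.Dict String Int)) (t0 : PySem.Dict String Int)
    (h : t0.keys.Nodup) :
    (ms.foldl (fun t m =>
      m.keys.foldl (fun t j => t.modify j 0 (fun v => v + m.getD j 0)) t) t0).keys.Nodup := by
  induction ms generalizing t0 with
  | nil => exact h
  | cons i ms ih =>
      exact ih _ (PySem.Dict.nodup_keys_foldl_modify_key i.keys (fun j => j) 0
        (fun _ j => fun v => v + i.getD j 0) t0 h)

-- ===== VERDICT (by name: the statement is the Claim_ definition above) =====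
theorem orangecap_spec : Claim_equal_orangecap := by
  intro a _ _
  let d := PySem.Dict.ofList a
  let ms : List (PySem.Dict String Int) := d.keys.map (fun k => PySem.Dict.ofList (d.getD k []))
  let c : PySem.Dict String (List Int) := ms.foldl (fun c i =>
    i.keys.foldl (fun c j => c.modify j [] (fun v => v ++ [i.getD j 0])) c) PySem.Dict.empty
  let totals : PySem.Dict String Int := ms.foldl (fun t m =>
    m.keys.foldl (fun t n => t.modify n 0 (fun v => v + m.getD n 0)) t) PySem.Dict.empty
  have hnd : ∀ i ∈ ms, i.keys.Nodup := by
    intro i hi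
    obtain ⟨k, _, rfl⟩ := List.mem_map.mp hi
    exact PySem.Dict.nodup_keys_ofList _
  have hmsV : d.values.map PySem.Dict.ofList = ms := by
    rw [PySem.Dict.values_eq_map_keys d (PySem.Dict.nodup_keys_ofList a) []]
    simp only [List.map_map, Function.comp_def]
    rfl
  have htot : (d.values.map PySem.Dict.ofList).foldl (fun t m =>
      m.items.foldl (fun t p => t.modify p.1 0 (fun v => v + p.2)) t) PySem.Dict.empty
      = totals := by
    rw [hmsV]
    apply PySem.List.foldl_congr_mem
    intro t m hm
    rw [PySem.Dict.items_eq_map_keys m (hnd m hm) 0, List.foldl_map]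
  have hTnodup : totals.keys.Nodup :=
    nodupT ms PySem.Dict.empty List.nodup_nil
  have hpairsB : totals.items.map (fun p => (p.2, p.1))
      = totals.keys.map (fun n => (totals.getD n 0, n)) := by
    rw [PySem.Dict.items_eq_map_keys totals hTnodup 0]
    simp [Function.comp_def]
  have hkeys : c.keys = totals.keys := by
    show (ms.foldl (fun c i =>
        i.keys.foldl (fun c j => c.modify j [] (fun v => v ++ [i.getD j 0])) c)
        PySem.Dict.empty).keys
      = (ms.foldl (fun t m =>
        m.keys.foldl (fun t n => t.modify n 0 (fun v => v + m.getD n 0)) t)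
        PySem.Dict.empty).keys
    rw [keysFold (fun i j => (fun v => v ++ [i.getD j 0])) [] ms PySem.Dict.empty,
      keysFold (fun m j => (fun v => v + m.getD j 0)) 0 ms PySem.Dict.empty]
    rfl
  have hpairs : c.keys.map (fun n => ((c.getD n []).sum, n))
      = totals.keys.map (fun n => (totals.getD n 0, n)) := by
    rw [hkeys]
    apply List.map_congr_left
    intro n _
    rw [show c = _ from rfl, getDC ms hnd PySem.Dict.empty n,
      show totals = _ from rfl, getDT ms hnd PySem.Dict.empty n]
    simp
  have key : PySem.List.pyGet?
      (PySem.List.sorted2 (c.keys.map (fun n => ((c.getD n []).sum, n)))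
        (fun p => p.1) (fun p => p.2) true) 0
      = PySem.List.max2?
        (((d.values.map PySem.Dict.ofList).foldl (fun t m =>
          m.items.foldl (fun t p => t.modify p.1 0 (fun v => v + p.2)) t)
          PySem.Dict.empty).items.map (fun p => (p.2, p.1)))
        (fun p => p.1) (fun p => p.2) := by
    rw [htot, hpairsB, ← hpairs, pyGet?_zero, sorted2_head_eq_max2?]
  show (match PySem.List.pyGet?
      (PySem.List.sorted2 (c.keys.map (fun n => ((c.getD n []).sum, n)))
        (fun p => p.1) (fun p => p.2) true) 0 with
    | some p => (p.2, p.1)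
    | none => ("", 0))
    = (match PySem.List.max2?
        (((d.values.map PySem.Dict.ofList).foldl (fun t m =>
          m.items.foldl (fun t p => t.modify p.1 0 (fun v => v + p.2)) t)
          PySem.Dict.empty).items.map (fun p => (p.2, p.1)))
        (fun p => p.1) (fun p => p.2) with
      | some p => (p.2, p.1)
      | none => ("", 0))
  rw [key]
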